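-- pv_equiv track=rewrite | github.com/Ahmedbne/IngenioPath | quiz.py | process_quiz_response
-- ===== SOURCE A (Python) =====
-- def process_quiz_response(response):
--     lines = response.split('\n')
--     processed_lines = []
--     for line in lines:
--         if line.strip().startswith(('A.', 'B.', 'C.', 'D.')):
--             processed_lines.append('\n' + line)
--         else:
--             processed_lines.append(line)
--     return '\n'.join(processed_lines)
-- ===== SOURCE B (Python) =====
-- def process_quiz_response(response):
--     # Single pass over the characters: at the start of the string and after each
--     # '\n', peek past horizontal whitespace; if an answer-choice marker follows,
--     # emit an extra '\n' there. No intermediate line list is built.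
--     def choice_ahead(i):
--         while i < len(response) and response[i] in ' \t\r\x0b\x0c':
--             i += 1
--         return response[i:i + 2] in ('A.', 'B.', 'C.', 'D.')
--
--     out = []
--     if choice_ahead(0):
--         out.append('\n')
--     for i, c in enumerate(response):
--         out.append(c)
--         if c == '\n' and choice_ahead(i + 1):
--             out.append('\n')
--     return ''.join(out)
-- ===== Notes on version B (the rewrite author's own statement) =====
-- stated objective: alternative
-- what changed: Replaces A's split-into-lines / conditional-append loop / join pipeline with a single left-to-right character pass that peeks ahead at each line start and inserts the extra newline in place, building no intermediate line list.
import Mathlib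
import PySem

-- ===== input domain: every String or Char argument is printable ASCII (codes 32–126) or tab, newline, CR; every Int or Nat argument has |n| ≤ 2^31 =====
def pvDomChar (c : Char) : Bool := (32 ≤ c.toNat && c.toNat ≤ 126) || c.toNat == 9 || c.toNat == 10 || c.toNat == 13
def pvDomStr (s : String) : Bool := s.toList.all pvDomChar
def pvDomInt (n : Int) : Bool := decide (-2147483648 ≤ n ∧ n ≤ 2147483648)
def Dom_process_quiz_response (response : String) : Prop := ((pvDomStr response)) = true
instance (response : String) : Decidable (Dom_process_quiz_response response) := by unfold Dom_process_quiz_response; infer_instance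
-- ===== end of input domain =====

-- B replaces A's split/append-loop/join with one character pass that inserts '\n'
-- at line starts followed by an answer-choice marker (objective: alternative).

-- ===== PORT A =====
-- line.strip().startswith(('A.', 'B.', 'C.', 'D.'))
def pvChoiceLine (line : List Char) : Bool :=
  PySem.Chars.startswith (PySem.Chars.strip line) ['A', '.'] ||
  PySem.Chars.startswith (PySem.Chars.strip line) ['B', '.'] ||
  PySem.Chars.startswith (PySem.Chars.strip line) ['C', '.'] ||
  PySem.Chars.startswith (PySem.Chars.strip line) ['D', '.']

def process_quiz_response (response : String) : String :=
  let lines := PySem.Chars.splitOn response.toList ['\n']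
  let processed := lines.foldl
    (fun acc line => if pvChoiceLine line then acc ++ [('\n' :: line)] else acc ++ [line])
    ([] : List (List Char))
  String.ofList (PySem.Chars.join ['\n'] processed)

-- ===== PORT B =====
-- response[i] in ' \t\r\x0b\x0c'
def pvHWS (c : Char) : Bool := c = ' ' || c = '\t' || c = '\r' || c = '\u000b' || c = '\u000c'

-- choice_ahead: skip horizontal whitespace, then test for 'A.'/'B.'/'C.'/'D.'
def pvChoiceAhead : List Char → Bool
  | [] => false
  | c :: rest =>
    if pvHWS c then pvChoiceAhead rest
    else (c = 'A' || c = 'B' || c = 'C' || c = 'D') &&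
         (match rest with | '.' :: _ => true | _ => false)

-- the enumerate loop: copy each char; after '\n', insert '\n' if a choice is ahead
def pvEmit : List Char → List Char
  | [] => []
  | c :: rest =>
    c :: (if c = '\n' && pvChoiceAhead rest then '\n' :: pvEmit rest else pvEmit rest)

def process_quiz_response_alt (response : String) : String :=
  let cs := response.toList
  String.ofList (if pvChoiceAhead cs then '\n' :: pvEmit cs else pvEmit cs)

-- ===== PRECONDITION & SPEC =====
def Spec_process_quiz_response (response : String) (out : String) : Prop := out = process_quiz_response_alt response
instance (response : String) (out : String) : Decidable (Spec_process_quiz_response response out) := by unfold Spec_process_quiz_response; infer_instance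

-- ===== CLAIM (what is proved, stated in full; the proofs are below) =====
def Claim_equal_process_quiz_response : Prop := ∀ (response : String), Dom_process_quiz_response response → Spec_process_quiz_response response (process_quiz_response response)

-- ===== LEMMAS AND PROOFS =====

-- proof-side simple recursion computing split-on-'\n'
def pvSplitNL : List Char → List (List Char)
  | [] => [[]]
  | c :: r =>
    if c = '\n' then [] :: pvSplitNL r
    else match pvSplitNL r with
         | [] => [[c]]
         | h :: t => (c :: h) :: t

theorem pvSplitNL_ne_nil (cs : List Char) : pvSplitNL cs ≠ [] := by
  cases cs with
  | nil => simp [pvSplitNL]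
  | cons c r =>
    simp only [pvSplitNL]
    split
    · simp
    · split <;> simp

theorem pv_go_eq (fuel : Nat) : ∀ (l cur : List Char) (accs : List (List Char)),
    l.length < fuel →
    PySem.Chars.splitOn.go ['\n'] fuel l cur accs =
      accs.reverse ++ (match pvSplitNL l with
        | [] => []
        | h :: t => (cur.reverse ++ h) :: t) := by
  induction fuel with
  | zero => intro l cur accs h; omega
  | succ f ih =>
    intro l cur accs h
    cases l with
    | nil =>
      rw [PySem.Chars.splitOn.go]
      simp [pvSplitNL]
      omega
    | cons c rest =>
      rw [PySem.Chars.splitOn.go]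
      by_cases hc : c = '\n'
      · subst hc
        rw [if_pos (by simp [List.isPrefixOf])]
        simp only [List.length_cons, List.length_nil, List.drop_succ_cons, List.drop_zero]
        rw [ih rest [] (cur.reverse :: accs) (by simpa using Nat.lt_of_succ_lt_succ h)]
        cases hr : pvSplitNL rest with
        | nil => exact absurd hr (pvSplitNL_ne_nil rest)
        | cons hh tt => simp [pvSplitNL, hr]
      · have hpre : (['\n'].isPrefixOf (c :: rest)) = false := by
          simp [List.isPrefixOf]; exact fun hcc => absurd hcc.symm hc
        rw [if_neg (by simp [hpre])]
        rw [ih rest (c :: cur) accs (by simpa using Nat.lt_of_succ_lt_succ h)]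
        cases hr : pvSplitNL rest with
        | nil => exact absurd hr (pvSplitNL_ne_nil rest)
        | cons hh tt => simp [pvSplitNL, hc, hr]

theorem pv_splitOn_eq (cs : List Char) :
    PySem.Chars.splitOn cs ['\n'] = pvSplitNL cs := by
  unfold PySem.Chars.splitOn
  rw [pv_go_eq (cs.length + 1) cs [] [] (by omega)]
  cases hr : pvSplitNL cs with
  | nil => exact absurd hr (pvSplitNL_ne_nil cs)
  | cons hh tt => simp

theorem pv_foldl_if_append (p : List Char → Bool) (ls : List (List Char)) (acc : List (List Char)) :
    ls.foldl (fun acc line => if p line then acc ++ [('\n' :: line)] else acc ++ [line]) acc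
      = acc ++ ls.map (fun line => if p line then '\n' :: line else line) := by
  induction ls generalizing acc with
  | nil => simp
  | cons l t ih => by_cases h : p l <;> simp [h, ih]

theorem pvSplitNL_nonl (line : List Char) (h : ∀ c ∈ line, c ≠ '\n') :
    pvSplitNL line = [line] := by
  induction line with
  | nil => rfl
  | cons c r ih =>
    have hc : c ≠ '\n' := h c (by simp)
    simp [pvSplitNL, hc, ih (fun x hx => h x (by simp [hx]))]

theorem pvSplitNL_append (line rest : List Char) (h : ∀ c ∈ line, c ≠ '\n') :
    pvSplitNL (line ++ '\n' :: rest) = line :: pvSplitNL rest := by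
  induction line with
  | nil => simp [pvSplitNL]
  | cons c r ih =>
    have hc : c ≠ '\n' := h c (by simp)
    simp [pvSplitNL, hc, ih (fun x hx => h x (by simp [hx]))]

theorem pvEmit_nonl (line cs : List Char) (h : ∀ c ∈ line, c ≠ '\n') :
    pvEmit (line ++ cs) = line ++ pvEmit cs := by
  induction line with
  | nil => rfl
  | cons c r ih =>
    have hc : c ≠ '\n' := h c (by simp)
    simp [pvEmit, hc, ih (fun x hx => h x (by simp [hx]))]

theorem pv_char_eq_iff (a b : Char) : a = b ↔ a.toNat = b.toNat := by
  constructor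
  · rintro rfl; rfl
  · intro h; apply Char.ext; unfold Char.toNat at h; exact UInt32.toNat_inj.mp h

theorem pv_hws_eq (c : Char) (hdc : pvDomChar c = true) (hne : c ≠ '\n') :
    pvHWS c = PySem.Chars.isspace c := by
  have h10 : c.toNat ≠ 10 := fun h => hne ((pv_char_eq_iff c '\n').mpr h)
  unfold pvDomChar at hdc
  simp only [Bool.or_eq_true, Bool.and_eq_true, decide_eq_true_eq, beq_iff_eq] at hdc
  rw [Bool.eq_iff_iff]
  simp only [pvHWS, PySem.Chars.isspace, Bool.or_eq_true, Bool.and_eq_true, decide_eq_true_eq,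
    pv_char_eq_iff]
  simp only [show (' ').toNat = 32 from rfl, show ('\t').toNat = 9 from rfl,
    show ('\r').toNat = 13 from rfl, show ('\u000b').toNat = 11 from rfl,
    show ('\u000c').toNat = 12 from rfl]
  omega

theorem pv_rstrip_cons (c : Char) (l : List Char) (h : PySem.Chars.isspace c = false) :
    PySem.Chars.rstrip (c :: l) = c :: PySem.Chars.rstrip l := by
  unfold PySem.Chars.rstrip
  rw [List.reverse_cons, List.dropWhile_append]
  by_cases hd : (List.dropWhile PySem.Chars.isspace l.reverse).isEmpty
  · rw [if_pos hd]
    rw [List.isEmpty_iff] at hd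
    simp [hd, List.dropWhile, h]
  · rw [if_neg hd]
    simp

theorem pv_rstrip_append_singleton (ys : List Char) (y : Char) :
    PySem.Chars.rstrip (ys ++ [y]) =
      if PySem.Chars.isspace y then PySem.Chars.rstrip ys else ys ++ [y] := by
  unfold PySem.Chars.rstrip
  rw [List.reverse_append, List.reverse_singleton, List.singleton_append, List.dropWhile_cons]
  by_cases hy : PySem.Chars.isspace y
  · simp [hy]
  · simp [hy]

theorem pv_dot_prefix (l : List Char) :
    (List.isPrefixOf ['.'] (PySem.Chars.rstrip l)) = (l.head? == some '.') := by
  induction l using List.reverseRecOn with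
  | nil => simp [PySem.Chars.rstrip]
  | append_singleton ys y ih =>
    rw [pv_rstrip_append_singleton]
    by_cases hy : PySem.Chars.isspace y
    · rw [if_pos hy, ih]
      cases ys with
      | nil =>
        have hy' : ¬(y = '.') := fun h => by rw [h] at hy; exact absurd hy (by decide)
        simp [hy']
      | cons z zs => simp
    · rw [if_neg hy]
      cases ys with
      | nil => simp [List.isPrefixOf]; exact eq_comm
      | cons z zs => simp [List.isPrefixOf]; exact eq_comm

theorem pv_head_match (rest : List Char) :
    (match rest with | '.' :: _ => true | _ => false) = (rest.head? == some '.') := by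
  cases rest with
  | nil => rfl
  | cons x xs => split <;> simp_all

theorem pv_choice_eq (line tail : List Char)
    (h : ∀ c ∈ line, c ≠ '\n') (hd : ∀ c ∈ line, pvDomChar c = true)
    (ht : tail = [] ∨ ∃ r, tail = '\n' :: r) :
    pvChoiceLine line = pvChoiceAhead (line ++ tail) := by
  induction line with
  | nil =>
    have htail : pvChoiceAhead tail = false := by
      rcases ht with rfl | ⟨r, rfl⟩
      · rfl
      · simp [pvChoiceAhead, pvHWS]
    simp [pvChoiceLine, PySem.Chars.strip, PySem.Chars.lstrip, PySem.Chars.rstrip,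
      PySem.Chars.startswith, htail]
  | cons c l ih =>
    have hc : c ≠ '\n' := h c (by simp)
    have hdc : pvDomChar c = true := hd c (by simp)
    by_cases hsp : pvHWS c = true
    · have hspace : PySem.Chars.isspace c = true := by rw [← pv_hws_eq c hdc hc]; exact hsp
      have hstrip : PySem.Chars.strip (c :: l) = PySem.Chars.strip l := by
        unfold PySem.Chars.strip PySem.Chars.lstrip
        rw [List.dropWhile_cons_of_pos hspace]
      have hgoal := ih (fun x hx => h x (by simp [hx])) (fun x hx => hd x (by simp [hx]))
      simp only [pvChoiceLine, hstrip, List.cons_append, pvChoiceAhead, hsp, if_pos]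
      exact hgoal
    · have hspace : PySem.Chars.isspace c = false := by
        rw [← pv_hws_eq c hdc hc]; simpa using hsp
      have hstrip : PySem.Chars.strip (c :: l) = c :: PySem.Chars.rstrip l := by
        unfold PySem.Chars.strip PySem.Chars.lstrip
        rw [List.dropWhile_cons_of_neg (by simp [hspace])]
        exact pv_rstrip_cons c l hspace
      have hhead : (((l ++ tail).head? == some '.') : Bool) = ((l.head? == some '.') : Bool) := by
        cases l with
        | cons x xs => simp
        | nil =>
          rcases ht with rfl | ⟨r, rfl⟩
          · simp
          · simp
      simp only [pvChoiceLine, hstrip, PySem.Chars.startswith, List.cons_append, pvChoiceAhead,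
        hsp, List.isPrefixOf, pv_dot_prefix, pv_head_match, hhead]
      rw [Bool.eq_iff_iff]
      simp only [Bool.or_eq_true, Bool.and_eq_true, beq_iff_eq, decide_eq_true_eq,
        if_neg (by simp : ¬(false = true))]
      aesop

theorem pv_head_dropWhile (p : Char → Bool) : ∀ (l : List Char) (x : Char) (r : List Char),
    List.dropWhile p l = x :: r → p x = false := by
  intro l
  induction l with
  | nil => intro x r h; simp at h
  | cons a t ih =>
    intro x r h
    rw [List.dropWhile_cons] at h
    by_cases ha : p a
    · rw [if_pos ha] at h; exact ih x r h
    · rw [if_neg ha] at h; cases h; simpa using ha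

-- the main correspondence
theorem pv_main (n : Nat) : ∀ (cs : List Char), cs.length ≤ n →
    (∀ c ∈ cs, pvDomChar c = true) →
    PySem.Chars.join ['\n'] ((pvSplitNL cs).map
        (fun line => if pvChoiceLine line then '\n' :: line else line))
      = (if pvChoiceAhead cs then '\n' :: pvEmit cs else pvEmit cs) := by
  induction n with
  | zero =>
    intro cs hlen _
    have : cs = [] := by cases cs with | nil => rfl | cons a b => simp at hlen
    subst this
    decide
  | succ m ih =>
    intro cs hlen hd
    by_cases hnl : '\n' ∈ cs
    · -- cs = l1 ++ '\n' :: rest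
      have hsplit := List.takeWhile_append_dropWhile (p := fun c => decide (c ≠ '\n')) (l := cs)
      have hdne : List.dropWhile (fun c => decide (c ≠ '\n')) cs ≠ [] := by
        intro hde
        rw [hde, List.append_nil] at hsplit
        have := List.mem_takeWhile_imp (hsplit ▸ hnl)
        simp at this
      obtain ⟨x, rest, hxr⟩ : ∃ x rest, List.dropWhile (fun c => decide (c ≠ '\n')) cs = x :: rest := by
        cases hde : List.dropWhile (fun c => decide (c ≠ '\n')) cs with
        | nil => exact absurd hde hdne
        | cons a b => exact ⟨a, b, rfl⟩
      have hx : x = '\n' := by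
        have := pv_head_dropWhile _ cs x rest hxr
        simpa using this
      subst hx
      set l1 := List.takeWhile (fun c => decide (c ≠ '\n')) cs with hl1
      have heq : cs = l1 ++ '\n' :: rest := by rw [← hsplit, hxr]
      have hl1nl : ∀ c ∈ l1, c ≠ '\n' := by
        intro c hc
        have := List.mem_takeWhile_imp hc
        simpa using this
      have hl1dom : ∀ c ∈ l1, pvDomChar c = true := by
        intro c hc
        exact hd c (heq ▸ List.mem_append_left _ hc)
      have hrestdom : ∀ c ∈ rest, pvDomChar c = true := by
        intro c hc
        exact hd c (heq ▸ List.mem_append_right _ (List.mem_cons_of_mem _ hc))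
      have hrestlen : rest.length ≤ m := by
        have : cs.length = l1.length + (rest.length + 1) := by rw [heq]; simp
        omega
      have hih := ih rest hrestlen hrestdom
      rw [heq, pvSplitNL_append l1 rest hl1nl]
      obtain ⟨hh, tt, hr⟩ : ∃ hh tt, pvSplitNL rest = hh :: tt := by
        cases hre : pvSplitNL rest with
        | nil => exact absurd hre (pvSplitNL_ne_nil rest)
        | cons a b => exact ⟨a, b, rfl⟩
      rw [hr, List.map_cons, List.map_cons, PySem.Chars.join_cons_cons]
      have hmap : ((if pvChoiceLine hh = true then '\n' :: hh else hh) ::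
          List.map (fun line => if pvChoiceLine line = true then '\n' :: line else line) tt)
          = List.map (fun line => if pvChoiceLine line = true then '\n' :: line else line)
              (hh :: tt) := rfl
      rw [hmap, ← hr, hih]
      have hchoice := pv_choice_eq l1 ('\n' :: rest) hl1nl hl1dom (Or.inr ⟨rest, rfl⟩)
      rw [pvEmit_nonl l1 ('\n' :: rest) hl1nl]
      have hemit : pvEmit ('\n' :: rest) =
          '\n' :: (if pvChoiceAhead rest then '\n' :: pvEmit rest else pvEmit rest) := by
        simp [pvEmit]
      rw [hemit, ← hchoice]
      by_cases hcl : pvChoiceLine l1 <;>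
        by_cases hca : pvChoiceAhead rest <;>
          simp [hcl, hca]
    · -- newline-free: a single line
      have hnlf : ∀ c ∈ cs, c ≠ '\n' := fun c hc he => hnl (he ▸ hc)
      rw [pvSplitNL_nonl cs hnlf, List.map_cons, List.map_nil, PySem.Chars.join_singleton]
      have hchoice := pv_choice_eq cs [] hnlf hd (Or.inl rfl)
      rw [List.append_nil] at hchoice
      have hemit : pvEmit cs = cs := by
        have h2 := pvEmit_nonl cs [] hnlf
        rw [List.append_nil] at h2
        rw [h2]
        simp [pvEmit]
      rw [← hchoice, hemit]

-- ===== VERDICT (by name: the statement is the Claim_ definition above) =====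
theorem process_quiz_response_spec : Claim_equal_process_quiz_response := by
  intro response hdom
  unfold Spec_process_quiz_response process_quiz_response process_quiz_response_alt
  have hd : ∀ c ∈ response.toList, pvDomChar c = true := by
    have := hdom
    unfold Dom_process_quiz_response pvDomStr at this
    simpa [List.all_eq_true] using this
  simp only [pv_splitOn_eq, pv_foldl_if_append, List.nil_append]
  rw [pv_main response.toList.length response.toList le_rfl hd]
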